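-- pv_equiv track=rewrite | github.com/tothedarktowercame/futon6 | scripts/nlab-wiring.py | parse_tikzcd_direction
-- ===== SOURCE A (Python) =====
-- def parse_tikzcd_direction(direction_str):
--     """Parse tikzcd direction codes like 'r', 'dr', 'rr' into (row_delta, col_delta)."""
--     row_delta = 0
--     col_delta = 0
--     for ch in direction_str:
--         if ch == 'r':
--             col_delta += 1
--         elif ch == 'l':
--             col_delta -= 1
--         elif ch == 'd':
--             row_delta += 1
--         elif ch == 'u':
--             row_delta -= 1
--     return row_delta, col_delta
-- ===== SOURCE B (Python) =====
-- _DELTA = {'r': (0, 1), 'l': (0, -1), 'd': (1, 0), 'u': (-1, 0)}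
--
-- def parse_tikzcd_direction(direction_str):
--     """Parse tikzcd direction codes like 'r', 'dr', 'rr' into (row_delta, col_delta)."""
--     # Divide and conquer: the delta of a string is the componentwise sum of the
--     # deltas of its halves; a single character is looked up in a vector table.
--     if len(direction_str) == 0:
--         return (0, 0)
--     if len(direction_str) == 1:
--         return _DELTA.get(direction_str, (0, 0))
--     mid = len(direction_str) // 2
--     r1, c1 = parse_tikzcd_direction(direction_str[:mid])
--     r2, c2 = parse_tikzcd_direction(direction_str[mid:])
--     return (r1 + r2, c1 + c2)
-- ===== Notes on version B (the rewrite author's own statement) =====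
-- stated objective: alternative
-- what changed: Replaced A's single left-to-right accumulating loop with four branches by a divide-and-conquer recursion: split the string at the midpoint, recurse on each half, and add the two delta vectors componentwise, with single characters resolved by a vector table lookup; correct because the delta is additive under concatenation.
import Mathlib
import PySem

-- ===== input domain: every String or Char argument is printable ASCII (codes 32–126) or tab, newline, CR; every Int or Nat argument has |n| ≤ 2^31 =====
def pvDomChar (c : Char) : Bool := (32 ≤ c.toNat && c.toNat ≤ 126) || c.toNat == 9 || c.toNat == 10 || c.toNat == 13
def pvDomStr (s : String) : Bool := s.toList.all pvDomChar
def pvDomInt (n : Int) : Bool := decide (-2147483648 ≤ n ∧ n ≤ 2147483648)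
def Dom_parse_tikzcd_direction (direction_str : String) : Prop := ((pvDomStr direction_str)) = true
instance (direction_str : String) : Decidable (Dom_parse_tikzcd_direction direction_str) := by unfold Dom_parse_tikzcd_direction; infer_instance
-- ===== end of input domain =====

-- B replaces A's accumulating loop by a divide-and-conquer recursion (split at the midpoint, add the halves' deltas); the delta is additive under concatenation (alternative structure, same cost).


-- ===== PORT A =====
-- literal transliteration: one pass over the characters, four ordered branches updating (row_delta, col_delta)
def parse_tikzcd_direction (direction_str : String) : Int × Int :=
  direction_str.toList.foldl
    (fun (acc : Int × Int) (ch : Char) =>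
      if ch == 'r' then (acc.1, acc.2 + 1)
      else if ch == 'l' then (acc.1, acc.2 - 1)
      else if ch == 'd' then (acc.1 + 1, acc.2)
      else if ch == 'u' then (acc.1 - 1, acc.2)
      else acc)
    (0, 0)

-- ===== PORT B =====
-- Source B's _DELTA table lookup for a single character (dict.get with default (0,0))
def pvCharDelta (c : Char) : Int × Int :=
  PySem.Dict.getD (PySem.Dict.ofList [('r', ((0 : Int), (1 : Int))), ('l', (0, -1)), ('d', (1, 0)), ('u', (-1, 0))]) c (0, 0)

-- literal transliteration of Source B: split at the midpoint, recurse, add componentwise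
def pvAltGo (l : List Char) : Int × Int :=
  match l with
  | [] => (0, 0)
  | [c] => pvCharDelta c
  | a :: b :: rest =>
    let mid := (a :: b :: rest).length / 2
    let x := pvAltGo ((a :: b :: rest).take mid)
    let y := pvAltGo ((a :: b :: rest).drop mid)
    (x.1 + y.1, x.2 + y.2)
termination_by l.length
decreasing_by
  · simp [List.length_take]; omega
  · simp; omega

def parse_tikzcd_direction_alt (direction_str : String) : Int × Int :=
  pvAltGo direction_str.toList

-- ===== PRECONDITION & SPEC =====
def Spec_parse_tikzcd_direction (direction_str : String) (out : Int × Int) : Prop := out = parse_tikzcd_direction_alt direction_str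
instance (direction_str : String) (out : Int × Int) : Decidable (Spec_parse_tikzcd_direction direction_str out) := by unfold Spec_parse_tikzcd_direction; infer_instance

-- ===== CLAIM (what is proved, stated in full; the proofs are below) =====
def Claim_equal_parse_tikzcd_direction : Prop := ∀ (direction_str : String), Dom_parse_tikzcd_direction direction_str → Spec_parse_tikzcd_direction direction_str (parse_tikzcd_direction direction_str)

-- ===== LEMMAS AND PROOFS =====

-- both sides equal this closed form of the delta
def pvDelta (l : List Char) : Int × Int :=
  ((l.count 'd' : Int) - (l.count 'u' : Int), (l.count 'r' : Int) - (l.count 'l' : Int))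

theorem pv_items : (PySem.Dict.ofList [('r', ((0 : Int), (1 : Int))), ('l', (0, -1)), ('d', (1, 0)), ('u', (-1, 0))]).items = [('r', ((0 : Int), (1 : Int))), ('l', (0, -1)), ('d', (1, 0)), ('u', (-1, 0))] := by
  rfl

theorem pv_alt_eq_delta (l : List Char) : pvAltGo l = pvDelta l := by
  induction l using pvAltGo.induct with
  | case1 => simp [pvAltGo, pvDelta]
  | case2 c =>
    by_cases h1 : c = 'r'
    · subst h1; simp [pvAltGo, pvCharDelta, pvDelta, PySem.Dict.getD, PySem.Dict.get?, pv_items]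
    by_cases h2 : c = 'l'
    · subst h2; simp [pvAltGo, pvCharDelta, pvDelta, PySem.Dict.getD, PySem.Dict.get?, pv_items, List.find?]
    by_cases h3 : c = 'd'
    · subst h3; simp [pvAltGo, pvCharDelta, pvDelta, PySem.Dict.getD, PySem.Dict.get?, pv_items, List.find?]
    by_cases h4 : c = 'u'
    · subst h4; simp [pvAltGo, pvCharDelta, pvDelta, PySem.Dict.getD, PySem.Dict.get?, pv_items, List.find?]
    have g1 : ('r' == c) = false := beq_eq_false_iff_ne.mpr (fun e => h1 e.symm)
    have g2 : ('l' == c) = false := beq_eq_false_iff_ne.mpr (fun e => h2 e.symm)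
    have g3 : ('d' == c) = false := beq_eq_false_iff_ne.mpr (fun e => h3 e.symm)
    have g4 : ('u' == c) = false := beq_eq_false_iff_ne.mpr (fun e => h4 e.symm)
    have k1 : (c == 'r') = false := beq_eq_false_iff_ne.mpr h1
    have k2 : (c == 'l') = false := beq_eq_false_iff_ne.mpr h2
    have k3 : (c == 'd') = false := beq_eq_false_iff_ne.mpr h3
    have k4 : (c == 'u') = false := beq_eq_false_iff_ne.mpr h4
    simp [pvAltGo, pvCharDelta, pvDelta, PySem.Dict.getD, PySem.Dict.get?, pv_items, List.find?,
      List.count_cons, List.count_nil, g1, g2, g3, g4, k1, k2, k3, k4]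
  | case3 a b rest mid ih1 ih2 =>
    rw [pvAltGo, ih1, ih2]
    simp only [pvDelta]
    have hc : ∀ x : Char, ((a :: b :: rest).take mid).count x + ((a :: b :: rest).drop mid).count x = (a :: b :: rest).count x := by
      intro x; rw [← List.count_append, List.take_append_drop]
    have e1 := hc 'd'; have e2 := hc 'u'; have e3 := hc 'r'; have e4 := hc 'l'
    simp only [Prod.mk.injEq]
    constructor <;> omega

-- loop invariant for A's fold
theorem pv_fold_inv (l : List Char) (r q : Int) :
    l.foldl
      (fun (acc : Int × Int) (ch : Char) =>
        if ch == 'r' then (acc.1, acc.2 + 1)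
        else if ch == 'l' then (acc.1, acc.2 - 1)
        else if ch == 'd' then (acc.1 + 1, acc.2)
        else if ch == 'u' then (acc.1 - 1, acc.2)
        else acc)
      (r, q)
    = (r + (l.count 'd' : Int) - (l.count 'u' : Int),
       q + (l.count 'r' : Int) - (l.count 'l' : Int)) := by
  induction l generalizing r q with
  | nil => simp
  | cons a t ih =>
    simp only [List.foldl_cons, List.count_cons]
    by_cases h1 : a = 'r' <;> [skip; by_cases h2 : a = 'l'] <;>
      [skip; skip; by_cases h3 : a = 'd'] <;> [skip; skip; skip; by_cases h4 : a = 'u'] <;>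
      simp_all <;> omega

-- ===== VERDICT (by name: the statement is the Claim_ definition above) =====
theorem parse_tikzcd_direction_spec : Claim_equal_parse_tikzcd_direction := by
  intro s _
  unfold Spec_parse_tikzcd_direction parse_tikzcd_direction parse_tikzcd_direction_alt
  rw [pv_fold_inv, pv_alt_eq_delta, pvDelta]
  simp
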